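-- pv_equiv track=rewrite | github.com/krishauser/Klampt | Python/python3_version/klampt/io/loader.py | parseLines
-- ===== SOURCE A (Python) =====
-- def parseLines(text):
--     """Returns a list of lines from the given text.  Understands end-of-line escapes '\\n'"""
--     lines = text.strip().split('\n')
--     esclines = []
--     esc = False
--     for l in lines:
--         if esc:
--             esclines[-1] = esclines[-1]+l
--         else:
--             esclines.append(l)
--         if len(l)>0 and l[-1]=='\\':
--             esclines[-1] = esclines[-1][:-1]
--             esc = True
--         else:
--             esc = False
--     return esclines
-- ===== SOURCE B (Python) =====
-- def parseLines(text):
--     """Returns a list of lines from the given text.  Understands end-of-line escapes '\\n'"""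
--     s = text.strip().replace('\\\n', '')
--     if s.endswith('\\'):
--         s = s[:-1]
--     return s.split('\n')
-- ===== Notes on version B (the rewrite author's own statement) =====
-- stated objective: simpler
-- what changed: Replaces the line-by-line scan with an esc state flag by one whole-text str.replace pass that collapses every backslash-newline continuation at once, one strip of a dangling trailing backslash, and a single split on newlines.
import Mathlib
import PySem

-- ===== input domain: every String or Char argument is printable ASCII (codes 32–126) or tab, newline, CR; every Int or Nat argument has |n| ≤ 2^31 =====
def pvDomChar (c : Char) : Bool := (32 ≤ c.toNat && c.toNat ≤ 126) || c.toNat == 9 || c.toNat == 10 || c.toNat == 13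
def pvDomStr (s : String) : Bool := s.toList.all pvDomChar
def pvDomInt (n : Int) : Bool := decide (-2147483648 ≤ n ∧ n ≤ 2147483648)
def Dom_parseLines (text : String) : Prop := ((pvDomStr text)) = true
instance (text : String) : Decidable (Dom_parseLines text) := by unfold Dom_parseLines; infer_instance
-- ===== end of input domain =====

set_option maxRecDepth 4000


-- B replaces A's line-by-line scan with an esc state flag by one replace('\\\n','') pass,
-- a single trailing-backslash strip, and one split('\n') — simpler, same result.

-- ===== PORT A =====
def parseLines (text : String) : List String :=
  let lines := (PySem.Str.split? (PySem.Str.strip text) "\n").getD []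
  let r := lines.foldl (fun (st : List String × Bool) (l : String) =>
    let es := if st.2 then st.1.dropLast ++ [st.1.getLastD "" ++ l] else st.1 ++ [l]
    if 0 < PySem.Str.len l ∧ PySem.Str.pyGet? l (-1) = some '\\' then
      (es.dropLast ++ [PySem.Str.slice (es.getLastD "") none (some (-1))], true)
    else (es, false)) ([], false)
  r.1

-- ===== PORT B =====
def parseLines_alt (text : String) : List String :=
  let s := PySem.Str.replace (PySem.Str.strip text) "\\\n" ""
  let s' := if PySem.Str.endswith s "\\" then PySem.Str.slice s none (some (-1)) else s
  (PySem.Str.split? s' "\n").getD []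

-- ===== PRECONDITION & SPEC =====
def Spec_parseLines (text : String) (out : List String) : Prop := out = parseLines_alt text
instance (text : String) (out : List String) : Decidable (Spec_parseLines text out) := by unfold Spec_parseLines; infer_instance

-- ===== CLAIM (what is proved, stated in full; the proofs are below) =====
def Claim_equal_parseLines : Prop := ∀ (text : String), Dom_parseLines text → Spec_parseLines text (parseLines text)

-- ===== LEMMAS AND PROOFS =====

-- clean recursion equal to PySem.Chars.splitOn · ['\n']
def mySplit : List Char → List Char → List (List Char)
  | [], cur => [cur.reverse]
  | c :: t, cur => if c = '\n' then cur.reverse :: mySplit t [] else mySplit t (c :: cur)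

-- clean recursion equal to PySem.Chars.replace · ['\\','\n'] []
def myRep : List Char → List Char
  | [] => []
  | [c] => [c]
  | c :: d :: t => if c = '\\' ∧ d = '\n' then myRep t else c :: myRep (d :: t)

-- A's fold, with the state (esclines, esc) compressed to (done lines, current partial line?)
def procA : Option (List Char) → List (List Char) → List (List Char)
  | none, [] => []
  | some cur, [] => [cur]
  | st, l :: rest =>
      let m := st.getD [] ++ l
      if l.getLast? = some '\\' then procA (some m.dropLast) rest else m :: procA none rest

-- the merged pieces as they sit inside B's replaced string (final dangling backslash kept)
def pieces : List Char → List (List Char) → List (List Char)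
  | cur, [] => [cur]
  | cur, [l] => [cur ++ l]
  | cur, l :: l' :: rest =>
      if l.getLast? = some '\\' then pieces (cur ++ l.dropLast) (l' :: rest)
      else (cur ++ l) :: pieces [] (l' :: rest)

def stripT (s : List Char) : List Char := if s.getLast? = some '\\' then s.dropLast else s

def dropBS : List (List Char) → List (List Char)
  | [] => []
  | [p] => [stripT p]
  | p :: q :: ps => p :: dropBS (q :: ps)

def joinNl (ps : List (List Char)) : List Char := List.intercalate ['\n'] ps

theorem getLast?_cons_ne {α : Type} (c : α) (l : List α) (h : l ≠ []) :
    (c :: l).getLast? = l.getLast? := by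
  cases l with
  | nil => exact absurd rfl h
  | cons d t => exact List.getLast?_cons_cons

theorem splitOn_go_eq (fuel : Nat) : ∀ (l cur : List Char) (acc : List (List Char)),
    l.length < fuel →
    PySem.Chars.splitOn.go ['\n'] fuel l cur acc = acc.reverse ++ mySplit l cur := by
  induction fuel with
  | zero => intro l cur acc h; omega
  | succ fuel ih =>
    intro l cur acc h
    cases l with
    | nil => simp [PySem.Chars.splitOn.go, mySplit]
    | cons c t =>
      by_cases hc : c = '\n'
      · subst hc
        rw [show PySem.Chars.splitOn.go ['\n'] (fuel+1) ('\n'::t) cur acc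
              = PySem.Chars.splitOn.go ['\n'] fuel t [] (cur.reverse :: acc) by
            simp [PySem.Chars.splitOn.go, List.isPrefixOf]]
        rw [ih t [] _ (by simpa using h)]
        simp [mySplit]
      · rw [show PySem.Chars.splitOn.go ['\n'] (fuel+1) (c::t) cur acc
              = PySem.Chars.splitOn.go ['\n'] fuel t (c :: cur) acc by
            simp [PySem.Chars.splitOn.go, List.isPrefixOf, Ne.symm hc]]
        rw [ih t (c :: cur) acc (by simpa using h)]
        simp [mySplit, hc]

theorem splitOn_eq (s : List Char) : PySem.Chars.splitOn s ['\n'] = mySplit s [] := by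
  rw [PySem.Chars.splitOn, splitOn_go_eq (s.length + 1) s [] [] (by omega)]
  simp

theorem myRep_cons (c : Char) (t : List Char) (h : c ≠ '\\' ∨ t.head? ≠ some '\n') :
    myRep (c :: t) = c :: myRep t := by
  cases t with
  | nil => simp [myRep]
  | cons d t' =>
    have : ¬ (c = '\\' ∧ d = '\n') := by
      rcases h with h | h
      · tauto
      · intro ⟨_, hd⟩; exact h (by simp [hd])
    simp [myRep, this]

theorem myRep_esc (t : List Char) : myRep ('\\' :: '\n' :: t) = myRep t := by
  simp [myRep]

theorem myRep_noNl (l : List Char) (h : '\n' ∉ l) : myRep l = l := by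
  induction l with
  | nil => simp [myRep]
  | cons c t ih =>
    simp only [List.mem_cons, not_or] at h
    rw [myRep_cons c t (Or.inr fun heq => h.2 (by
      cases t with
      | nil => simp at heq
      | cons d t' => simp only [List.head?, Option.some.injEq] at heq; simp [heq]))]
    rw [ih h.2]

theorem myRep_chunk (l : List Char) (hl : '\n' ∉ l) (rest : List Char) :
    myRep (l ++ '\n' :: rest) =
      if l.getLast? = some '\\' then l.dropLast ++ myRep rest
      else l ++ '\n' :: myRep rest := by
  induction l with
  | nil =>
    simp only [List.nil_append, List.getLast?_nil, List.dropLast_nil]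
    rw [if_neg (by simp)]
    exact myRep_cons '\n' rest (Or.inl (by decide))
  | cons c l' ih =>
    simp only [List.mem_cons, not_or] at hl
    cases l' with
    | nil =>
      by_cases hc : c = '\\'
      · subst hc
        simp only [List.cons_append, List.nil_append]
        rw [myRep_esc, if_pos (by simp)]
        simp
      · simp only [List.cons_append, List.nil_append]
        rw [myRep_cons c _ (Or.inl hc), myRep_cons '\n' rest (Or.inl (by decide))]
        rw [if_neg (by simp [hc])]
    | cons d t =>
      have hd : d ≠ '\n' := fun hdq => hl.2 (List.mem_cons.mpr (Or.inl hdq.symm))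
      simp only [List.cons_append]
      rw [myRep_cons c _ (Or.inr (by simp [hd]))]
      rw [show d :: (t ++ '\n' :: rest) = (d :: t) ++ '\n' :: rest from rfl, ih hl.2,
          List.getLast?_cons_cons]
      split
      · rw [show (c :: d :: t).dropLast = c :: (d :: t).dropLast from
            List.dropLast_cons_of_ne_nil (by simp)]
        simp
      · simp

theorem replace_go_eq (fuel : Nat) : ∀ (l acc : List Char),
    l.length ≤ fuel →
    PySem.Chars.replace.go ['\\', '\n'] [] fuel l acc = acc.reverse ++ myRep l := by
  induction fuel with
  | zero =>
    intro l acc h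
    have : l = [] := by cases l with | nil => rfl | cons a b => simp at h
    subst this
    simp [PySem.Chars.replace.go, myRep]
  | succ fuel ih =>
    intro l acc h
    cases l with
    | nil => simp [PySem.Chars.replace.go, myRep]
    | cons c t =>
      by_cases hpre : c = '\\' ∧ t.head? = some '\n'
      · obtain ⟨rfl, ht⟩ := hpre
        cases t with
        | nil => simp at ht
        | cons d t' =>
          obtain rfl : d = '\n' := by simpa using ht
          rw [show PySem.Chars.replace.go ['\\', '\n'] [] (fuel+1) ('\\'::'\n'::t') acc
                = PySem.Chars.replace.go ['\\', '\n'] [] fuel t' acc by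
              rw [PySem.Chars.replace.go, if_pos (by simp [List.isPrefixOf])]; simp]
          rw [ih t' acc (by simp at h; omega)]
          rw [myRep_esc]
      · have hnp : (['\\', '\n'].isPrefixOf (c :: t)) = false := by
          cases t with
          | nil => simp [List.isPrefixOf]
          | cons d t' =>
            have hcd : ¬(c = '\\' ∧ d = '\n') := fun ⟨h1, h2⟩ => hpre ⟨h1, by simp [h2]⟩
            simp only [List.isPrefixOf, Bool.and_eq_false_iff, beq_eq_false_iff_ne]
            rcases not_and_or.mp hcd with h1 | h2
            · exact Or.inl (Ne.symm h1)
            · exact Or.inr (Or.inl (Ne.symm h2))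
        rw [show PySem.Chars.replace.go ['\\', '\n'] [] (fuel+1) (c::t) acc
              = PySem.Chars.replace.go ['\\', '\n'] [] fuel t (c :: acc) by
            rw [PySem.Chars.replace.go, if_neg (by simp [hnp])]]
        rw [ih t (c :: acc) (by simp at h; omega)]
        rw [myRep_cons c t (by tauto)]
        simp

theorem replace_eq (s : List Char) : PySem.Chars.replace s ['\\', '\n'] [] = myRep s := by
  rw [PySem.Chars.replace]
  simp [replace_go_eq s.length s [] (le_refl _)]

theorem joinNl_cons (p : List Char) (ps : List (List Char)) (h : ps ≠ []) :
    joinNl (p :: ps) = p ++ '\n' :: joinNl ps := by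
  cases ps with
  | nil => exact absurd rfl h
  | cons q ps => simp [joinNl, List.intercalate, List.intersperse]

theorem mySplit_ne_nil (s cur : List Char) : mySplit s cur ≠ [] := by
  induction s generalizing cur with
  | nil => simp [mySplit]
  | cons c t ih =>
    simp only [mySplit]
    split <;> simp [ih]

theorem mySplit_chunk (p : List Char) (hp : '\n' ∉ p) : ∀ (rest cur : List Char),
    mySplit (p ++ rest) cur = mySplit rest (p.reverse ++ cur) := by
  induction p with
  | nil => intro rest cur; simp
  | cons c p' ih =>
    intro rest cur
    simp only [List.mem_cons, not_or] at hp
    simp only [List.cons_append, mySplit, if_neg (Ne.symm hp.1)]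
    rw [ih hp.2 rest (c :: cur)]
    simp

theorem join_mySplit (s : List Char) : ∀ cur, joinNl (mySplit s cur) = cur.reverse ++ s := by
  induction s with
  | nil => intro cur; simp [mySplit, joinNl, List.intercalate]
  | cons c t ih =>
    intro cur
    simp only [mySplit]
    by_cases hc : c = '\n'
    · subst hc
      rw [if_pos rfl, joinNl_cons _ _ (mySplit_ne_nil t []), ih []]
      simp
    · rw [if_neg hc, ih (c :: cur)]
      simp

theorem noNl_mySplit (s : List Char) : ∀ cur, '\n' ∉ cur →
    ∀ p ∈ mySplit s cur, '\n' ∉ p := by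
  induction s with
  | nil => intro cur hcur p hp; simp [mySplit] at hp; simpa [hp] using (by simpa using hcur)
  | cons c t ih =>
    intro cur hcur p hp
    simp only [mySplit] at hp
    by_cases hc : c = '\n'
    · rw [if_pos hc] at hp
      rcases List.mem_cons.mp hp with rfl | hp
      · simpa using hcur
      · exact ih [] (by simp) p hp
    · rw [if_neg hc] at hp
      exact ih (c :: cur) (by simp [hcur, Ne.symm hc]) p hp

theorem mySplit_join : ∀ (ps : List (List Char)) (p cur : List Char),
    (∀ q ∈ p :: ps, '\n' ∉ q) →
    mySplit (joinNl (p :: ps)) cur = (cur.reverse ++ p) :: ps := by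
  intro ps
  induction ps with
  | nil =>
    intro p cur h
    have hp : '\n' ∉ p := h p (by simp)
    have hj : joinNl [p] = p := by simp [joinNl, List.intercalate]
    rw [hj, show p = p ++ ([] : List Char) by simp, mySplit_chunk p hp []]
    simp [mySplit]
  | cons q ps ih =>
    intro p cur h
    rw [joinNl_cons p (q :: ps) (by simp), mySplit_chunk p (h p (by simp)) _ cur]
    simp only [mySplit]
    rw [ih q [] (fun r hr => h r (List.mem_cons_of_mem p hr))]
    simp

theorem mySplit_last_ne_nil (s : List Char) : ∀ cur, s ≠ [] → s.getLast? ≠ some '\n' →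
    (mySplit s cur).getLast? ≠ some [] := by
  induction s with
  | nil => intro cur h; exact absurd rfl h
  | cons c t ih =>
    intro cur _ hlast
    cases t with
    | nil =>
      have hc : c ≠ '\n' := by simpa using hlast
      simp [mySplit, if_neg hc]
    | cons d t' =>
      have hlast' : (d :: t').getLast? ≠ some '\n' := by
        rwa [List.getLast?_cons_cons] at hlast
      by_cases hc : c = '\n'
      · subst hc
        rw [show mySplit ('\n' :: d :: t') cur = cur.reverse :: mySplit (d :: t') [] from by
          rw [mySplit]; simp]
        rw [getLast?_cons_ne _ _ (mySplit_ne_nil (d :: t') [])]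
        exact ih [] (by simp) hlast'
      · rw [show mySplit (c :: d :: t') cur = mySplit (d :: t') (c :: cur) from by
          rw [mySplit]; simp [hc]]
        exact ih (c :: cur) (by simp) hlast'

theorem pieces_ne_nil (lines : List (List Char)) : ∀ (cur : List Char), pieces cur lines ≠ [] := by
  induction lines with
  | nil => intro cur; simp [pieces]
  | cons l rest ih =>
    intro cur
    cases rest with
    | nil => simp [pieces]
    | cons l' rest' =>
      rw [pieces]
      split
      · exact ih _
      · simp

theorem pieces_noNl (lines : List (List Char)) : ∀ cur, '\n' ∉ cur →
    (∀ l ∈ lines, '\n' ∉ l) → ∀ p ∈ pieces cur lines, '\n' ∉ p := by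
  induction lines with
  | nil => intro cur hcur _ p hp; simp [pieces] at hp; simpa [hp] using hcur
  | cons l rest ih =>
    intro cur hcur hl p hp
    cases rest with
    | nil =>
      simp only [pieces, List.mem_singleton] at hp
      subst hp
      simp only [List.mem_append, not_or]
      exact ⟨hcur, hl l (by simp)⟩
    | cons l' rest' =>
      rw [pieces] at hp
      split at hp
      · refine ih _ ?_ (fun q hq => hl q (List.mem_cons_of_mem l hq)) p hp
        simp only [List.mem_append, not_or]
        exact ⟨hcur, fun hmem => hl l (by simp) (List.dropLast_subset _ hmem)⟩
      · rcases List.mem_cons.mp hp with rfl | hp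
        · simp only [List.mem_append, not_or]
          exact ⟨hcur, hl l (by simp)⟩
        · exact ih [] (by simp) (fun q hq => hl q (List.mem_cons_of_mem l hq)) p hp

theorem myRep_join (lines : List (List Char)) : ∀ cur, lines ≠ [] →
    (∀ l ∈ lines, '\n' ∉ l) →
    cur ++ myRep (joinNl lines) = joinNl (pieces cur lines) := by
  induction lines with
  | nil => intro cur h; exact absurd rfl h
  | cons l rest ih =>
    intro cur _ hl
    cases rest with
    | nil =>
      rw [show joinNl [l] = l by simp [joinNl, List.intercalate]]
      rw [myRep_noNl l (hl l (by simp))]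
      simp [pieces, joinNl, List.intercalate]
    | cons l' rest' =>
      rw [joinNl_cons l (l' :: rest') (by simp)]
      rw [myRep_chunk l (hl l (by simp)) _]
      rw [pieces]
      split
      · rw [← List.append_assoc]
        exact ih _ (by simp) (fun q hq => hl q (List.mem_cons_of_mem l hq))
      · rw [joinNl_cons _ _ (pieces_ne_nil (l' :: rest') [])]
        rw [← ih [] (by simp) (fun q hq => hl q (List.mem_cons_of_mem l hq))]
        simp

theorem dropBS_ne_nil (ps : List (List Char)) (h : ps ≠ []) : dropBS ps ≠ [] := by
  cases ps with
  | nil => exact absurd rfl h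
  | cons p ps =>
    cases ps with
    | nil => simp [dropBS]
    | cons q ps' => simp [dropBS]

theorem dropBS_noNl (ps : List (List Char)) (h : ∀ p ∈ ps, '\n' ∉ p) :
    ∀ q ∈ dropBS ps, '\n' ∉ q := by
  induction ps with
  | nil => simp [dropBS]
  | cons p ps ih =>
    intro q hq
    cases ps with
    | nil =>
      simp only [dropBS, List.mem_singleton] at hq
      subst hq
      unfold stripT
      split
      · exact fun hm => h p (by simp) (List.dropLast_subset _ hm)
      · exact h p (by simp)
    | cons r ps' =>
      rw [dropBS] at hq
      rcases List.mem_cons.mp hq with rfl | hq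
      · exact h q (by simp)
      · exact ih (fun x hx => h x (List.mem_cons_of_mem p hx)) q hq

theorem stripT_join (ps : List (List Char)) (h : ps ≠ []) (hn : ∀ p ∈ ps, '\n' ∉ p) :
    stripT (joinNl ps) = joinNl (dropBS ps) := by
  induction ps with
  | nil => exact absurd rfl h
  | cons p ps ih =>
    cases ps with
    | nil =>
      rw [show joinNl [p] = p by simp [joinNl, List.intercalate]]
      rw [show dropBS [p] = [stripT p] from rfl]
      rw [show joinNl [stripT p] = stripT p by simp [joinNl, List.intercalate]]
    | cons q ps' =>
      have hj := ih (by simp) (fun x hx => hn x (List.mem_cons_of_mem p hx))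
      rw [joinNl_cons p (q :: ps') (by simp), dropBS,
          joinNl_cons p (dropBS (q :: ps')) (dropBS_ne_nil _ (by simp))]
      rcases hje : joinNl (q :: ps') with _ | ⟨x, xs⟩
      · rw [hje] at hj
        have hj0 : joinNl (dropBS (q :: ps')) = [] := by simpa [stripT] using hj.symm
        unfold stripT
        rw [if_neg (by rw [List.getLast?_append]; simp), hj0]
      · rw [hje] at hj
        unfold stripT at hj ⊢
        rw [List.getLast?_append, getLast?_cons_ne '\n' (x :: xs) (by simp)]
        rcases hxl : (x :: xs).getLast? with _ | c
        · simp at hxl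
        · rw [hxl] at hj
          rw [Option.some_or]
          by_cases hbs : c = '\\'
          · subst hbs
            rw [if_pos rfl] at hj
            rw [if_pos rfl, List.dropLast_append_cons,
                List.dropLast_cons_of_ne_nil (by simp), ← hj]
          · rw [if_neg (by simp [hbs])] at hj
            rw [if_neg (by simp [hbs]), ← hj]

theorem procA_eq (lines : List (List Char)) : ∀ (st : Option (List Char)), lines ≠ [] →
    lines.getLast? ≠ some [] →
    procA st lines = dropBS (pieces (st.getD []) lines) := by
  induction lines with
  | nil => intro st h; exact absurd rfl h
  | cons l rest ih =>
    intro st _ hlast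
    cases rest with
    | nil =>
      have hl : l ≠ [] := fun h => hlast (by simp [h])
      rw [show procA st [l] = (if l.getLast? = some '\\'
            then [(st.getD [] ++ l).dropLast] else [st.getD [] ++ l]) from by
        rw [procA]; split <;> simp [procA]]
      rw [show pieces (st.getD []) [l] = [st.getD [] ++ l] from rfl]
      rw [show dropBS [st.getD [] ++ l] = [stripT (st.getD [] ++ l)] from rfl]
      unfold stripT
      rw [List.getLast?_append]
      rcases hgl : l.getLast? with _ | c
      · exact absurd (List.getLast?_eq_none_iff.mp hgl) hl
      · rw [Option.some_or]
        split <;> rename_i hP <;> simp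
    | cons l' rest' =>
      have hlast' : (l' :: rest').getLast? ≠ some [] := by
        rwa [getLast?_cons_ne l (l' :: rest') (by simp)] at hlast
      rw [procA, pieces]
      split
      · rename_i hbs
        have hlne : l ≠ [] := by intro h; subst h; simp at hbs
        rw [ih (some ((st.getD [] ++ l).dropLast)) (by simp) hlast']
        congr 2
        rcases hgl : l.getLast? with _ | c
        · exact absurd hgl (by simp [hlne])
        · obtain ⟨l0, rfl⟩ : ∃ l0, l = l0 ++ [c] :=
            ⟨l.dropLast, (List.dropLast_append_getLast? c (Option.mem_def.mpr hgl)).symm⟩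
          simp
      · rw [ih none (by simp) hlast']
        rcases hp : pieces [] (l' :: rest') with _ | ⟨x, xs⟩
        · exact absurd hp (pieces_ne_nil _ _)
        · simp only [Option.getD_none]
          rw [hp]
          rw [show dropBS ((st.getD [] ++ l) :: x :: xs) =
              (st.getD [] ++ l) :: dropBS (x :: xs) from rfl]

theorem pyGet_neg_one (l : List Char) : PySem.List.pyGet? l (-1) = l.getLast? := by
  cases l with
  | nil => simp [PySem.List.pyGet?, PySem.List.pyIdx?]
  | cons c t =>
    rw [List.getLast?_eq_getElem?]
    simp [PySem.List.pyGet?, PySem.List.pyIdx?]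

theorem endswith_singleton (l : List Char) (c : Char) :
    PySem.Chars.endswith l [c] = true ↔ l.getLast? = some c := by
  rw [PySem.Chars.endswith_iff]
  constructor
  · rintro ⟨t, rfl⟩; simp
  · intro h; exact ⟨l.dropLast, List.dropLast_append_getLast? c (Option.mem_def.mpr h)⟩

theorem slice_ofList (m : List Char) :
    PySem.Str.slice (String.ofList m) none (some (-1)) = String.ofList m.dropLast := by
  have h := PySem.Str.slice_to_neg_one (String.ofList m)
  rw [← String.ofList_toList (s := PySem.Str.slice (String.ofList m) none (some (-1))), h]
  simp

theorem split_str (s : String) :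
    (PySem.Str.split? s "\n").getD [] = (mySplit s.toList []).map String.ofList := by
  have h := PySem.Str.split?_map s "\n"
  have hnl : ("\n" : String).toList = ['\n'] := by decide
  rw [hnl] at h
  rcases hsp : PySem.Str.split? s "\n" with _ | ls
  · rw [hsp] at h
    simp [PySem.Chars.split?] at h
  · rw [hsp] at h
    simp only [Option.map_some] at h
    rw [show PySem.Chars.split? s.toList ['\n'] = some (PySem.Chars.splitOn s.toList ['\n']) from by
      simp [PySem.Chars.split?]] at h
    simp only [Option.some.injEq] at h
    rw [splitOn_eq] at h
    have : ls = (mySplit s.toList []).map String.ofList := by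
      rw [← h]
      simp [Function.comp_def]
    simp [this]


theorem strip_last_ne_nl (t : List Char) : (PySem.Chars.strip t).getLast? ≠ some '\n' := by
  intro h
  unfold PySem.Chars.strip PySem.Chars.rstrip at h
  rw [List.getLast?_reverse] at h
  have hw := List.head?_dropWhile_not PySem.Chars.isspace (PySem.Chars.lstrip t).reverse
  rw [h] at hw
  exact absurd hw (by decide)

theorem foldA (lsC : List (List Char)) : ∀ (done : List String) (st : Option (List Char)),
    (List.foldl
      (fun (st : List String × Bool) (l : String) =>
        let es := if st.2 then st.1.dropLast ++ [st.1.getLastD "" ++ l] else st.1 ++ [l]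
        if 0 < PySem.Str.len l ∧ PySem.Str.pyGet? l (-1) = some '\\' then
          (es.dropLast ++ [PySem.Str.slice (es.getLastD "") none (some (-1))], true)
        else (es, false))
      (done ++ (st.map String.ofList).toList, st.isSome) (lsC.map String.ofList)).1
      = done ++ (procA st lsC).map String.ofList := by
  induction lsC with
  | nil => intro done st; cases st <;> simp [procA]
  | cons lc ls ih =>
    intro done st
    rw [List.map_cons, List.foldl_cons]
    have hget : PySem.Str.pyGet? (String.ofList lc) (-1) = lc.getLast? := by
      simp [pyGet_neg_one]
    have hlen : PySem.Str.len (String.ofList lc) = (lc.length : Int) := by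
      simp [PySem.Str.len]
    by_cases hbs : lc.getLast? = some '\\'
    · have hlc : lc ≠ [] := by intro hh; rw [hh] at hbs; simp at hbs
      have hc : 0 < PySem.Str.len (String.ofList lc) ∧
          PySem.Str.pyGet? (String.ofList lc) (-1) = some '\\' := by
        refine ⟨by rw [hlen]; exact_mod_cast List.length_pos_iff.mpr hlc, by rw [hget]; exact hbs⟩
      cases st with
      | none =>
        rw [show procA none (lc :: ls) = procA (some (lc.dropLast)) ls from by
          rw [procA, if_pos hbs]; simp]
        have := ih done (some lc.dropLast)
        simp only [Option.map_some, Option.toList_some, Option.isSome_some] at this ⊢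
        simp only [Option.map_none, Option.toList_none, List.append_nil, Option.isSome_none]
        rw [← this]
        congr 1
        simp only [if_pos hc]
        simp only [Bool.false_eq_true, if_false, List.dropLast_concat,
          List.getLastD_concat, slice_ofList]
      | some cur =>
        rw [show procA (some cur) (lc :: ls) = procA (some ((cur ++ lc).dropLast)) ls from by
          rw [procA, if_pos hbs]; simp]
        have := ih done (some (cur ++ lc).dropLast)
        simp only [Option.map_some, Option.toList_some, Option.isSome_some] at this ⊢
        rw [← this]
        congr 1
        simp only [if_pos hc, if_true, List.dropLast_concat, List.getLastD_concat,
          ← String.ofList_append, slice_ofList]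
    · have hc : ¬(0 < PySem.Str.len (String.ofList lc) ∧
          PySem.Str.pyGet? (String.ofList lc) (-1) = some '\\') := by
        rintro ⟨-, h2⟩; rw [hget] at h2; exact hbs h2
      cases st with
      | none =>
        rw [show procA none (lc :: ls) = ([] ++ lc) :: procA none ls from by
          rw [procA, if_neg hbs]; simp]
        have := ih (done ++ [String.ofList lc]) none
        simp only [Option.map_none, Option.toList_none, List.append_nil, Option.isSome_none] at this ⊢
        rw [if_neg hc] at *
        simp only [Bool.false_eq_true, if_false] at *
        rw [this]
        simp
      | some cur =>
        rw [show procA (some cur) (lc :: ls) = (cur ++ lc) :: procA none ls from by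
          rw [procA, if_neg hbs]; simp]
        have := ih (done ++ [String.ofList (cur ++ lc)]) none
        simp only [Option.map_some, Option.toList_some, Option.isSome_some,
          Option.map_none, Option.toList_none, List.append_nil, Option.isSome_none] at this ⊢
        rw [if_neg hc] at *
        simp only [if_true] at *
        rw [List.dropLast_concat, List.getLastD_concat, ← String.ofList_append] at *
        rw [this]
        simp

theorem portA_char (text : String) :
    parseLines text =
      (procA none (mySplit (PySem.Chars.strip text.toList) [])).map String.ofList := by
  rw [show parseLines text
        = ((((PySem.Str.split? (PySem.Str.strip text) "\n").getD []).foldl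
            (fun (st : List String × Bool) (l : String) =>
              let es := if st.2 then st.1.dropLast ++ [st.1.getLastD "" ++ l] else st.1 ++ [l]
              if 0 < PySem.Str.len l ∧ PySem.Str.pyGet? l (-1) = some '\\' then
                (es.dropLast ++ [PySem.Str.slice (es.getLastD "") none (some (-1))], true)
              else (es, false)) ([], false)).1) from rfl]
  rw [show (PySem.Str.split? (PySem.Str.strip text) "\n").getD []
        = (mySplit (PySem.Chars.strip text.toList) []).map String.ofList from by
    rw [split_str (PySem.Str.strip text), PySem.Str.toList_strip]]
  have := foldA (mySplit (PySem.Chars.strip text.toList) []) [] none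
  simpa using this

theorem portB_char (text : String) :
    parseLines_alt text =
      (mySplit (stripT (myRep (PySem.Chars.strip text.toList))) []).map String.ofList := by
  rw [show parseLines_alt text
        = (PySem.Str.split? (if PySem.Str.endswith (PySem.Str.replace (PySem.Str.strip text) "\\\n" "") "\\" = true
            then PySem.Str.slice (PySem.Str.replace (PySem.Str.strip text) "\\\n" "") none (some (-1))
            else PySem.Str.replace (PySem.Str.strip text) "\\\n" "") "\n").getD [] from rfl]
  have hR : (PySem.Str.replace (PySem.Str.strip text) "\\\n" "").toList
      = myRep (PySem.Chars.strip text.toList) := by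
    rw [PySem.Str.toList_replace, PySem.Str.toList_strip,
        show ("\\\n" : String).toList = ['\\', '\n'] from by decide,
        show ("" : String).toList = [] from by decide, replace_eq]
  have hend : PySem.Str.endswith (PySem.Str.replace (PySem.Str.strip text) "\\\n" "") "\\"
      = PySem.Chars.endswith (myRep (PySem.Chars.strip text.toList)) ['\\'] := by
    rw [PySem.Str.endswith_eq, hR, show ("\\" : String).toList = ['\\'] from by decide]
  by_cases hbs : (myRep (PySem.Chars.strip text.toList)).getLast? = some '\\'
  · rw [show (if PySem.Str.endswith (PySem.Str.replace (PySem.Str.strip text) "\\\n" "") "\\" = true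
          then PySem.Str.slice (PySem.Str.replace (PySem.Str.strip text) "\\\n" "") none (some (-1))
          else PySem.Str.replace (PySem.Str.strip text) "\\\n" "")
        = String.ofList ((myRep (PySem.Chars.strip text.toList)).dropLast) from by
      rw [if_pos (by rw [hend]; exact (endswith_singleton _ _).mpr hbs)]
      rw [← String.ofList_toList (s := PySem.Str.replace (PySem.Str.strip text) "\\\n" ""), hR,
          slice_ofList]]
    rw [split_str]
    unfold stripT
    rw [if_pos hbs]
    simp
  · rw [show (if PySem.Str.endswith (PySem.Str.replace (PySem.Str.strip text) "\\\n" "") "\\" = true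
          then PySem.Str.slice (PySem.Str.replace (PySem.Str.strip text) "\\\n" "") none (some (-1))
          else PySem.Str.replace (PySem.Str.strip text) "\\\n" "")
        = PySem.Str.replace (PySem.Str.strip text) "\\\n" "" from by
      rw [if_neg (by rw [hend]; intro hh; exact hbs ((endswith_singleton _ _).mp hh))]]
    rw [split_str, hR]
    unfold stripT
    rw [if_neg hbs]

theorem char_equiv (s : List Char) (hs : s.getLast? ≠ some '\n') :
    procA none (mySplit s []) = mySplit (stripT (myRep s)) [] := by
  by_cases hnil : s = []
  · subst hnil
    simp [mySplit, myRep, stripT, procA]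
  · have hne : mySplit s [] ≠ [] := mySplit_ne_nil s []
    have hnoNl : ∀ p ∈ mySplit s [], '\n' ∉ p := noNl_mySplit s [] (by simp)
    have hjoin : joinNl (mySplit s []) = s := by simpa using join_mySplit s []
    have hlast : (mySplit s []).getLast? ≠ some [] := mySplit_last_ne_nil s [] hnil hs
    rw [procA_eq (mySplit s []) none hne hlast]
    have hrep : myRep s = joinNl (pieces [] (mySplit s [])) := by
      have h0 := myRep_join (mySplit s []) [] hne hnoNl
      rw [hjoin] at h0
      simpa using h0
    rw [hrep]
    rw [stripT_join _ (pieces_ne_nil _ _) (pieces_noNl _ [] (by simp) hnoNl)]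
    rcases hd : dropBS (pieces [] (mySplit s [])) with _ | ⟨x, xs⟩
    · exact absurd hd (dropBS_ne_nil _ (pieces_ne_nil _ _))
    · rw [mySplit_join xs x [] (by
        rw [← hd]
        exact dropBS_noNl _ (pieces_noNl _ [] (by simp) hnoNl))]
      simpa using hd

-- ===== VERDICT (by name: the statement is the Claim_ definition above) =====
theorem parseLines_spec : Claim_equal_parseLines := by
  intro text _
  unfold Spec_parseLines
  rw [portA_char, portB_char, char_equiv _ (strip_last_ne_nl _)]
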